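-- pv_equiv track=rewrite | github.com/jdposada/slack_app_test | omop_index.py | split_labeled_blocks
-- ===== SOURCE A (Python) =====
-- def split_labeled_blocks(blocks: list[tuple[str, str]]) -> list[tuple[str, str]]:
--     if not blocks:
--         return []
--
--     groups: list[tuple[str, str]] = []
--     current_label = "Summary"
--     current_parts: list[str] = []
--
--     for block_type, text in blocks:
--         if block_type == "paragraph" and is_label_paragraph(text):
--             if current_parts:
--                 groups.append((current_label, "\n".join(current_parts)))
--             current_label = text
--             current_parts = []
--             continue
--         current_parts.append(text)
--
--     if current_parts:
--         groups.append((current_label, "\n".join(current_parts)))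
--
--     return [(label, body) for label, body in groups if body.strip()]
--
-- def is_label_paragraph(text: str) -> bool:
--     if len(text) > 40:
--         return False
--     if any(character in text for character in ".:;"):
--         return False
--     words = text.split()
--     if not words:
--         return False
--     return all(word[:1].isupper() for word in words if word[0].isalpha())
-- ===== SOURCE B (Python) =====
-- def is_label_paragraph(text: str) -> bool:
--     if len(text) > 40:
--         return False
--     if any(character in text for character in ".:;"):
--         return False
--     words = text.split()
--     if not words:
--         return False
--     return all(word[:1].isupper() for word in words if word[0].isalpha())
--
--
-- def split_labeled_blocks(blocks: list[tuple[str, str]]) -> list[tuple[str, str]]: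
--     # Segment-at-a-time: scan forward to the NEXT label paragraph, emit the whole
--     # segment before it in one step (skipping empty/blank ones), then jump past
--     # the label; no per-block state machine and no final filtering pass.
--     out: list[tuple[str, str]] = []
--     label = "Summary"
--     i = 0
--     n = len(blocks)
--     while i < n:
--         j = i
--         while j < n and not (blocks[j][0] == "paragraph"
--                              and is_label_paragraph(blocks[j][1])):
--             j += 1
--         parts = [text for _, text in blocks[i:j]]
--         if parts:
--             body = "\n".join(parts)
--             if body.strip():
--                 out.append((label, body))
--         if j < n:
--             label = blocks[j][1]
--         i = j + 1
--     return out
-- ===== Notes on version B (the rewrite author's own statement) =====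
-- stated objective: alternative
-- what changed: B works segment-at-a-time: an outer loop scans forward to the next label paragraph, emits the whole preceding segment at once (dropping empty or blank ones on the spot) and jumps past the label, instead of A's per-block state machine that accumulates parts/groups and filters blank bodies in a trailing comprehension.
import Mathlib
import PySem

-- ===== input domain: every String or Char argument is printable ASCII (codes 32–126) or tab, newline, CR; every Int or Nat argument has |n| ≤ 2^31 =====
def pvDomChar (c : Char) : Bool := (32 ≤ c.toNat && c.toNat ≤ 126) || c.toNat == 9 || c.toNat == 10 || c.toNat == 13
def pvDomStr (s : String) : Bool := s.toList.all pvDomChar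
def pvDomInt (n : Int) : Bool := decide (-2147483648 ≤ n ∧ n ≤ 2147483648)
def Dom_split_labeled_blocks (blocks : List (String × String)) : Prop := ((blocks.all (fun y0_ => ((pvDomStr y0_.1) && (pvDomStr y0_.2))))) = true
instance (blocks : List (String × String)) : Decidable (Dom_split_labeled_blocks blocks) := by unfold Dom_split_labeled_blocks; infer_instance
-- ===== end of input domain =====

-- B regroups segment-at-a-time: an outer loop scans ahead to the next label paragraph, emits the
-- whole preceding segment at once (dropping empty/blank ones on the spot) and jumps past the label,
-- instead of A's per-block state machine plus trailing filter; objective: alternative (same cost).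

-- ===== PORT A =====
-- shared helper, identical in Source A and Source B
-- str.isupper() of the 1-char slice word[:1], ported by hand (exact for ASCII input:
-- some cased character present and no lowercase one; cased ASCII chars are the letters)
def strIsupper1 (cs : List Char) : Bool :=
  cs.any (fun c => PySem.Chars.isupper c || PySem.Chars.islower c) && cs.all (fun c => !(PySem.Chars.islower c))

def is_label_paragraph (text : String) : Bool :=
  if PySem.Str.len text > 40 then false
  else if ['.', ':', ';'].any (fun c => PySem.Chars.isIn [c] text.toList) then false
  else
    let words := PySem.Str.split₀ text
    if words = [] then false
    else words.all (fun w =>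
      -- 'if word[0].isalpha()' filter: words from split() are nonempty, so word[0] exists
      match w.toList with
      | [] => true
      | c0 :: _ => if PySem.Chars.isalpha c0 then strIsupper1 (w.toList.take 1) else true)

-- "\n".join(parts)
def joinNL (parts : List String) : String := PySem.Str.join "\n" parts

-- truthiness of body.strip()
def keepBody (body : String) : Bool := !(PySem.Str.strip body == "")

-- A's for-loop, as structural recursion over the same (groups, current_label, current_parts) state
def loopA : List (String × String) → List (String × String) × String × List String → List (String × String) × String × List String
  | [], st => st
  | b :: bs, st =>
      if b.1 == "paragraph" && is_label_paragraph b.2 then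
        loopA bs ((if st.2.2 ≠ [] then st.1 ++ [(st.2.1, joinNL st.2.2)] else st.1), b.2, [])
      else loopA bs (st.1, st.2.1, st.2.2 ++ [b.2])

def split_labeled_blocks (blocks : List (String × String)) : List (String × String) :=
  if blocks = [] then []
  else
    let st := loopA blocks ([], "Summary", [])
    let groups := if st.2.2 ≠ [] then st.1 ++ [(st.2.1, joinNL st.2.2)] else st.1
    groups.filter (fun g => keepBody g.2)

-- ===== PORT B =====
-- the inner while-condition of Source B: blocks[j] is a label paragraph
def isLabelBlock (b : String × String) : Bool := b.1 == "paragraph" && is_label_paragraph b.2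

-- Source B's outer while over the remaining suffix blocks[i:]: the inner 'while j < n and not …'
-- scan is takeWhile/dropWhile of the not-a-label predicate (exact), the slice blocks[i:j]
-- comprehension is the map of .2 over the scanned prefix, out is the accumulator
def loopSeg (bs : List (String × String)) (label : String) (out : List (String × String)) : List (String × String) :=
  match bs with
  | [] => out
  | b :: bs' =>
    let parts := ((b :: bs').takeWhile (fun x => !(isLabelBlock x))).map (fun x => x.2)
    let out' := if parts ≠ [] && keepBody (joinNL parts) then out ++ [(label, joinNL parts)] else out
    match h : (b :: bs').dropWhile (fun x => !(isLabelBlock x)) with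
    | [] => out'
    | c :: rest => loopSeg rest c.2 out'
termination_by bs.length
decreasing_by
  have hle := List.length_dropWhile_le (p := fun x => !(isLabelBlock x)) (l := b :: bs')
  rw [h] at hle
  simp only [List.length_cons] at hle ⊢
  omega

def split_labeled_blocks_alt (blocks : List (String × String)) : List (String × String) :=
  loopSeg blocks "Summary" []

-- ===== PRECONDITION & SPEC =====
def Spec_split_labeled_blocks (blocks : List (String × String)) (out : List (String × String)) : Prop := out = split_labeled_blocks_alt blocks
instance (blocks : List (String × String)) (out : List (String × String)) : Decidable (Spec_split_labeled_blocks blocks out) := by unfold Spec_split_labeled_blocks; infer_instance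

-- ===== CLAIM (what is proved, stated in full; the proofs are below) =====
def Claim_equal_split_labeled_blocks : Prop := ∀ (blocks : List (String × String)), Dom_split_labeled_blocks blocks → Spec_split_labeled_blocks blocks (split_labeled_blocks blocks)

-- ===== LEMMAS AND PROOFS =====

-- A's raw group list (before the final filter), started from label l / pending parts p
def rawA : List (String × String) → String → List String → List (String × String)
  | [], l, p => if p ≠ [] then [(l, joinNL p)] else []
  | b :: bs, l, p =>
      if b.1 == "paragraph" && is_label_paragraph b.2 then
        (if p ≠ [] then [(l, joinNL p)] else []) ++ rawA bs b.2 []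
      else rawA bs l (p ++ [b.2])

-- canonical form both sides reach: (finished segments after the first label, texts before it)
def coreB : List (String × String) → List (String × String) × List String
  | [] => ([], [])
  | b :: bs =>
      let r := coreB bs
      if isLabelBlock b then
        ((if keepBody (joinNL r.2) then (b.2, joinNL r.2) :: r.1 else r.1), [])
      else (r.1, b.2 :: r.2)

-- a segment as it survives the filter
def emitSeg (l : String) (q : List String) : List (String × String) :=
  if keepBody (joinNL q) then [(l, joinNL q)] else []

theorem keep_join_nil : keepBody (joinNL []) = false := by decide

theorem filter_pending (l : String) (p : List String) :
    (if p ≠ [] then [(l, joinNL p)] else []).filter (fun g => keepBody g.2) = emitSeg l p := by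
  by_cases hp : p = []
  · simp [hp, emitSeg, keep_join_nil]
  · by_cases hk : keepBody (joinNL p) <;> simp [hp, hk, emitSeg]

theorem loopA_finish (bs : List (String × String)) :
    ∀ (g : List (String × String)) (l : String) (p : List String),
      (let st := loopA bs (g, l, p)
       if st.2.2 ≠ [] then st.1 ++ [(st.2.1, joinNL st.2.2)] else st.1)
      = g ++ rawA bs l p := by
  induction bs with
  | nil =>
      intro g l p
      by_cases hp : p = [] <;> simp [loopA, rawA, hp]
  | cons b bs ih =>
      intro g l p
      by_cases hb : (b.1 == "paragraph" && is_label_paragraph b.2) = true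
      · by_cases hp : p = [] <;>
          simp [loopA, rawA, hb, hp, ih, List.append_assoc]
      · simp [loopA, rawA, hb, ih]

theorem filter_rawA (bs : List (String × String)) :
    ∀ (l : String) (p : List String),
      (rawA bs l p).filter (fun g => keepBody g.2)
        = emitSeg l (p ++ (coreB bs).2) ++ (coreB bs).1 := by
  induction bs with
  | nil =>
      intro l p
      simpa [rawA, coreB] using filter_pending l p
  | cons b bs ih =>
      intro l p
      by_cases hb : (b.1 == "paragraph" && is_label_paragraph b.2) = true
      · rw [rawA, if_pos hb, List.filter_append, filter_pending, ih b.2 []]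
        simp only [coreB, isLabelBlock, hb, if_pos]
        by_cases hk : keepBody (joinNL (coreB bs).2) <;>
          simp [hk, emitSeg]
      · rw [rawA, if_neg hb, ih l (p ++ [b.2])]
        simp only [coreB, isLabelBlock, hb]
        simp [List.append_assoc]

-- the guarded emission of Source B equals emitSeg (empty parts join to "", which strip rejects)
theorem emit_guard (l : String) (q : List String) :
    (if q ≠ [] && keepBody (joinNL q) then [(l, joinNL q)] else []) = emitSeg l q := by
  by_cases hq : q = []
  · simp [hq, emitSeg, keep_join_nil]
  · by_cases hk : keepBody (joinNL q) <;> simp [emitSeg, hq, hk]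

-- what parts the inner scan collects = the pre-label texts of coreB
theorem takeWhile_parts (bs : List (String × String)) :
    (bs.takeWhile (fun b => !(isLabelBlock b))).map (fun b => b.2) = (coreB bs).2 := by
  induction bs with
  | nil => simp [coreB]
  | cons b bs ih =>
      by_cases hb : isLabelBlock b = true
      · simp [hb, coreB]
      · simp only [List.takeWhile_cons, hb]
        simpa [coreB, hb] using ih

-- the post-label remainder, folded through coreB
theorem dropWhile_core (bs : List (String × String)) :
    (match bs.dropWhile (fun b => !(isLabelBlock b)) with
     | [] => ([] : List (String × String))
     | c :: rest => emitSeg c.2 (coreB rest).2 ++ (coreB rest).1) = (coreB bs).1 := by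
  induction bs with
  | nil => simp [coreB]
  | cons b bs ih =>
      by_cases hb : isLabelBlock b = true
      · simp only [List.dropWhile_cons, hb, Bool.not_true, coreB, if_pos]
        by_cases hk : keepBody (joinNL (coreB bs).2) <;> simp [hk, emitSeg]
      · simp only [List.dropWhile_cons, hb]
        simpa [coreB, hb] using ih

-- unfold lemmas for loopSeg (one per outcome of the inner label scan)
theorem loopSeg_nil (l : String) (out : List (String × String)) : loopSeg [] l out = out := by
  rw [loopSeg.eq_def]

theorem loopSeg_cons_nil (b : String × String) (bs' : List (String × String)) (l : String)
    (out : List (String × String))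
    (hd : (b :: bs').dropWhile (fun x => !(isLabelBlock x)) = []) :
    loopSeg (b :: bs') l out =
      (let parts := ((b :: bs').takeWhile (fun x => !(isLabelBlock x))).map (fun x => x.2)
       if parts ≠ [] && keepBody (joinNL parts) then out ++ [(l, joinNL parts)] else out) := by
  rw [loopSeg.eq_def]
  dsimp only []
  split
  · rfl
  · rename_i c rest hx
    rw [hd] at hx
    cases hx

theorem loopSeg_cons_cons (b : String × String) (bs' : List (String × String)) (l : String)
    (out : List (String × String)) (c : String × String) (rest : List (String × String))
    (hd : (b :: bs').dropWhile (fun x => !(isLabelBlock x)) = c :: rest) :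
    loopSeg (b :: bs') l out =
      (let parts := ((b :: bs').takeWhile (fun x => !(isLabelBlock x))).map (fun x => x.2)
       loopSeg rest c.2
         (if parts ≠ [] && keepBody (joinNL parts) then out ++ [(l, joinNL parts)] else out)) := by
  rw [loopSeg.eq_def]
  dsimp only []
  split
  · rename_i hx
    rw [hd] at hx
    cases hx
  · rename_i c' rest' hx
    rw [hd] at hx
    cases hx
    rfl

-- the accumulator of loopSeg factors out
theorem loopSeg_acc (n : Nat) :
    ∀ (bs : List (String × String)), bs.length ≤ n →
      ∀ (l : String) (out : List (String × String)),
        loopSeg bs l out = out ++ loopSeg bs l [] := by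
  induction n with
  | zero =>
      intro bs hn l out
      have : bs = [] := List.eq_nil_of_length_eq_zero (Nat.le_zero.mp hn)
      subst this; simp [loopSeg_nil]
  | succ n ih =>
      intro bs hn l out
      match bs with
      | [] => simp [loopSeg_nil]
      | b :: bs' =>
          cases h : (b :: bs').dropWhile (fun x => !(isLabelBlock x)) with
          | nil =>
              rw [loopSeg_cons_nil b bs' l out h, loopSeg_cons_nil b bs' l [] h]
              dsimp only []
              split_ifs <;> simp
          | cons c rest =>
              have hle := List.length_dropWhile_le (p := fun x => !(isLabelBlock x)) (l := b :: bs')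
              rw [h] at hle
              simp only [List.length_cons] at hle hn
              have hr : rest.length ≤ n := by omega
              rw [loopSeg_cons_cons b bs' l out c rest h, loopSeg_cons_cons b bs' l [] c rest h]
              dsimp only []
              have hacc : ∀ X, loopSeg rest c.2 X = X ++ loopSeg rest c.2 [] := fun X => ih rest hr c.2 X
              conv_lhs => rw [hacc]
              conv_rhs => rw [hacc]
              split_ifs <;> simp

-- loopSeg computes emitSeg-of-prefix followed by the finished segments
theorem loopSeg_spec (n : Nat) :
    ∀ (bs : List (String × String)), bs.length ≤ n →
      ∀ (l : String), loopSeg bs l [] = emitSeg l (coreB bs).2 ++ (coreB bs).1 := by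
  induction n with
  | zero =>
      intro bs hn l
      have : bs = [] := List.eq_nil_of_length_eq_zero (Nat.le_zero.mp hn)
      subst this; simp [loopSeg_nil, coreB, emitSeg, keep_join_nil]
  | succ n ih =>
      intro bs hn l
      match bs with
      | [] => simp [loopSeg_nil, coreB, emitSeg, keep_join_nil]
      | b :: bs' =>
          have hparts := takeWhile_parts (b :: bs')
          have hdrop := dropWhile_core (b :: bs')
          cases h : (b :: bs').dropWhile (fun x => !(isLabelBlock x)) with
          | nil =>
              rw [h] at hdrop
              dsimp only [] at hdrop
              rw [loopSeg_cons_nil b bs' l [] h]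
              dsimp only []
              rw [hparts]
              simp only [List.nil_append]
              rw [emit_guard, ← hdrop]
              simp
          | cons c rest =>
              have hle := List.length_dropWhile_le (p := fun x => !(isLabelBlock x)) (l := b :: bs')
              rw [h] at hle
              simp only [List.length_cons] at hle hn
              have hr : rest.length ≤ n := by omega
              rw [h] at hdrop
              dsimp only [] at hdrop
              rw [loopSeg_cons_cons b bs' l [] c rest h]
              dsimp only []
              rw [loopSeg_acc n rest hr, ih rest hr c.2, hdrop, hparts]
              simp only [List.nil_append]
              rw [emit_guard]

-- ===== VERDICT (by name: the statement is the Claim_ definition above) =====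
theorem split_labeled_blocks_spec : Claim_equal_split_labeled_blocks := by
  unfold Claim_equal_split_labeled_blocks
  intro blocks _
  unfold Spec_split_labeled_blocks
  have hB : split_labeled_blocks_alt blocks
      = emitSeg "Summary" (coreB blocks).2 ++ (coreB blocks).1 := by
    unfold split_labeled_blocks_alt
    exact loopSeg_spec blocks.length blocks (le_refl _) "Summary"
  rw [hB]
  by_cases h0 : blocks = []
  · subst h0; simp [split_labeled_blocks, coreB, emitSeg, keep_join_nil]
  · unfold split_labeled_blocks
    rw [if_neg h0]
    simp only []
    rw [loopA_finish blocks [] "Summary" []]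
    simpa using filter_rawA blocks "Summary" []
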